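-- pv_equiv track=rewrite | github.com/gabriellaec/desoft-analise-exercicios | backup/user_372/ch167_2020_06_22_18_52_52_130152.py | bairro_mais_custoso
-- ===== SOURCE A (Python) =====
-- def bairro_mais_custoso(gastos):
--     dic1 = {}
--     dic2 = {}
--     for bairro, valor in gastos.items():
--         dic1[bairro] = valor[6:12]
--     for a, b in dic1.items():
--         dic2[a] = sum(b)
--     for i, j in dic2.items():
--         if j == max(dic2.values()):
--             return i
-- ===== SOURCE B (Python) =====
-- def bairro_mais_custoso(gastos):
--     best_key = None
--     best_sum = 0
--     for bairro, valor in gastos.items():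
--         s = sum(valor[6:12])
--         if best_key is None or s > best_sum:
--             best_key, best_sum = bairro, s
--     return best_key
-- ===== Notes on version B (the rewrite author's own statement) =====
-- stated objective: faster
-- what changed: Replaces A's three passes (build a dict of slices, build a dict of sums, then rescan the sum dict against a max that A recomputes on every scan step) with a single pass keeping the running best key and best sum, updating only on a strictly larger sum so the first maximum still wins; Pre_ excludes association lists with duplicate keys, which do not encode a Python dict.
import Mathlib
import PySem

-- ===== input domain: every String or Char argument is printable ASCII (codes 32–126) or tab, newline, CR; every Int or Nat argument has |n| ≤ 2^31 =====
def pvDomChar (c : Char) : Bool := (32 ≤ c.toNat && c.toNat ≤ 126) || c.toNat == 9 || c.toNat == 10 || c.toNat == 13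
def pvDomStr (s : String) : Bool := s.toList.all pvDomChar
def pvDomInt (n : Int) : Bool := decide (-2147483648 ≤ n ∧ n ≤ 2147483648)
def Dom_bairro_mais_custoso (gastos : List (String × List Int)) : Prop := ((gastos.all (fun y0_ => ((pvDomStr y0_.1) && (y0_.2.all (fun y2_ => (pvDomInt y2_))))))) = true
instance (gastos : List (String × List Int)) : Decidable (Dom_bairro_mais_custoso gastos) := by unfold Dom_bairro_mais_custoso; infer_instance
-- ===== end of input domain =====

-- B replaces A's three dict passes by a single running-best fold (same result; objective: simpler).


-- ===== PORT A =====
-- third loop of A: 'for i, j in dic2.items(): if j == max(dic2.values()): return i'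
-- (the max is recomputed each iteration, as in the Python; 'none' branch is the unreachable
-- empty-max case: the loop body only runs when dic2 is nonempty, where Python's max returns)
def loopA (dic2 : PySem.Dict String Int) : List (String × Int) → Option String
  | [] => none
  | (i, j) :: rest =>
      match PySem.List.max? dic2.values (fun x => x) with
      | none => loopA dic2 rest
      | some m => if j = m then some i else loopA dic2 rest

def bairro_mais_custoso (gastos : List (String × List Int)) : Option String :=
  let dic1 : PySem.Dict String (List Int) :=
    gastos.foldl (fun d p => d.insert p.1 (PySem.List.slice p.2 (some 6) (some 12))) PySem.Dict.empty
  let dic2 : PySem.Dict String Int :=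
    dic1.items.foldl (fun d p => d.insert p.1 (p.2.foldl (· + ·) 0)) PySem.Dict.empty
  loopA dic2 dic2.items

-- ===== PORT B =====
def bairro_mais_custoso_alt (gastos : List (String × List Int)) : Option String :=
  (gastos.foldl (fun acc p =>
      let s := (PySem.List.slice p.2 (some 6) (some 12)).foldl (· + ·) 0
      match acc.1 with
      | none => (some p.1, s)
      | some _ => if s > acc.2 then (some p.1, s) else acc)
    ((none : Option String), (0 : Int))).1

-- ===== PRECONDITION & SPEC =====
-- Pre_ excludes association lists with duplicate keys: they do not encode a Python dict
-- (gastos is a dict, whose items always have distinct keys), so the encoding is only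
-- meaningful on key-Nodup lists.
def Pre_bairro_mais_custoso (gastos : List (String × List Int)) : Prop :=
  (gastos.map Prod.fst).Nodup
instance (gastos : List (String × List Int)) : Decidable (Pre_bairro_mais_custoso gastos) := by
  unfold Pre_bairro_mais_custoso; infer_instance
def pvWitness_bairro_mais_custoso : (List (String × List Int)) :=
  [("a", [0, 0, 0, 0, 0, 0, 2]), ("b", [1])]
def Spec_bairro_mais_custoso (gastos : List (String × List Int)) (out : Option String) : Prop := out = bairro_mais_custoso_alt gastos
instance (gastos : List (String × List Int)) (out : Option String) : Decidable (Spec_bairro_mais_custoso gastos out) := by unfold Spec_bairro_mais_custoso; infer_instance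

-- ===== CLAIM (what is proved, stated in full; the proofs are below) =====
def Claim_equal_bairro_mais_custoso : Prop := ∀ (gastos : List (String × List Int)), Dom_bairro_mais_custoso gastos → Pre_bairro_mais_custoso gastos → Spec_bairro_mais_custoso gastos (bairro_mais_custoso gastos)

-- ===== LEMMAS AND PROOFS =====

-- the running best pair: first-encountered strict maximum of snd
def bestP (p : String × Int) : List (String × Int) → String × Int
  | [] => p
  | q :: t => bestP (if q.2 > p.2 then q else p) t

-- first key whose value equals m
def fmScan (m : Int) : List (String × Int) → Option String
  | [] => none
  | (i, j) :: rest => if j = m then some i else fmScan m rest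

lemma bestP_snd_ge (l : List (String × Int)) : ∀ p : String × Int, p.2 ≤ (bestP p l).2 := by
  induction l with
  | nil => intro p; simp [bestP]
  | cons q t ih =>
      intro p
      simp only [bestP]
      split_ifs with h
      · exact le_trans (le_of_lt h) (ih q)
      · exact ih p

lemma bestP_eq_of_snd_le (l : List (String × Int)) :
    ∀ p : String × Int, (bestP p l).2 ≤ p.2 → bestP p l = p := by
  induction l with
  | nil => intro p _; rfl
  | cons q t ih =>
      intro p h
      simp only [bestP] at h ⊢
      split_ifs at h ⊢ with hq
      · exact absurd (lt_of_lt_of_le hq (bestP_snd_ge t q)) (not_lt.mpr h)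
      · exact ih p h

lemma foldl_max_eq_bestP_snd (l : List (String × Int)) :
    ∀ p : String × Int, (l.map Prod.snd).foldl max p.2 = (bestP p l).2 := by
  induction l with
  | nil => intro p; rfl
  | cons q t ih =>
      intro p
      simp only [List.map_cons, List.foldl_cons, bestP]
      split_ifs with h
      · rw [max_eq_right (le_of_lt h)]; exact ih q
      · rw [max_eq_left (not_lt.mp h)]; exact ih p

lemma fm_bestP (l : List (String × Int)) :
    ∀ p : String × Int, fmScan (bestP p l).2 (p :: l) = some (bestP p l).1 := by
  induction l with
  | nil => intro p; simp [bestP, fmScan]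
  | cons q t ih =>
      intro p
      simp only [bestP] at *
      split_ifs with h
      · -- q.2 > p.2 : p can never attain the max
        have hm : q.2 ≤ (bestP q t).2 := bestP_snd_ge t q
        have hne : p.2 ≠ (bestP q t).2 := by omega
        simpa [fmScan, hne] using ih q
      · -- q.2 ≤ p.2 : q is redundant
        have hm : p.2 ≤ (bestP p t).2 := bestP_snd_ge t p
        by_cases hp : p.2 = (bestP p t).2
        · have : bestP p t = p := bestP_eq_of_snd_le t p (le_of_eq hp.symm)
          simp [fmScan, this]
        · have hq : q.2 ≠ (bestP p t).2 := by omega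
          have := ih p
          simp only [fmScan, if_neg hp] at this
          simp [fmScan, hp, hq, this]

-- the key-and-sum view of an entry
def sumSlice (p : String × List Int) : String × Int :=
  (p.1, (PySem.List.slice p.2 (some 6) (some 12)).foldl (· + ·) 0)

-- B's fold, once the accumulator holds a key, is bestP over the sumSlice view
lemma foldB (l : List (String × List Int)) :
    ∀ k0 : String, ∀ s0 : Int,
      l.foldl (fun acc p =>
          let s := (PySem.List.slice p.2 (some 6) (some 12)).foldl (· + ·) 0
          match acc.1 with
          | none => (some p.1, s)
          | some _ => if s > acc.2 then (some p.1, s) else acc)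
        (some k0, s0)
      = (some (bestP (k0, s0) (l.map sumSlice)).1, (bestP (k0, s0) (l.map sumSlice)).2) := by
  induction l with
  | nil => intro k0 s0; rfl
  | cons p t ih =>
      intro k0 s0
      simp only [List.foldl_cons, List.map_cons, bestP]
      show t.foldl _ (if (sumSlice p).2 > s0 then (some p.1, (sumSlice p).2) else (some k0, s0)) = _
      split_ifs with h
      · simpa using ih p.1 (sumSlice p).2
      · simpa using ih k0 s0

-- loopA with a fixed nonempty dict is fmScan of its max
lemma loopA_eq_fmScan (d : PySem.Dict String Int) (m : Int)
    (hm : PySem.List.max? d.values (fun x => x) = some m) :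
    ∀ l, loopA d l = fmScan m l := by
  intro l
  induction l with
  | nil => rfl
  | cons p t ih =>
      obtain ⟨i, j⟩ := p
      simp only [loopA, fmScan, hm, ih]

-- ===== VERDICT (by name: the statement is the Claim_ definition above) =====
theorem bairro_mais_custoso_spec : Claim_equal_bairro_mais_custoso := by
  intro gastos _ hpre
  show bairro_mais_custoso gastos = bairro_mais_custoso_alt gastos
  -- A's first dict: distinct fresh keys, so the insert loop is a map
  have h1 : (gastos.foldl (fun d p => d.insert p.1 (PySem.List.slice p.2 (some 6) (some 12)))
      PySem.Dict.empty).items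
      = gastos.map (fun p => (p.1, PySem.List.slice p.2 (some 6) (some 12))) := by
    simpa using PySem.Dict.items_foldl_insert_fresh (l := gastos) (k := Prod.fst)
      (v := fun p => PySem.List.slice p.2 (some 6) (some 12)) (d := PySem.Dict.empty)
      (by intro a _; simp [PySem.Dict.contains_empty]) hpre
  -- its keys are still the keys of gastos, hence Nodup
  have hk1 : ((gastos.map (fun p : String × List Int =>
      (p.1, PySem.List.slice p.2 (some 6) (some 12)))).map Prod.fst).Nodup := by
    simpa [List.map_map, Function.comp] using hpre
  simp only [bairro_mais_custoso, bairro_mais_custoso_alt]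
  set d2 := ((gastos.foldl (fun d p => d.insert p.1 (PySem.List.slice p.2 (some 6) (some 12)))
      PySem.Dict.empty).items.foldl (fun d p => d.insert p.1 (p.2.foldl (· + ·) 0))
      PySem.Dict.empty) with hd2
  -- A's second dict is the sumSlice map
  have h2 : d2.items = gastos.map sumSlice := by
    rw [hd2, h1]
    have := PySem.Dict.items_foldl_insert_fresh
      (l := gastos.map (fun p : String × List Int =>
        (p.1, PySem.List.slice p.2 (some 6) (some 12))))
      (k := Prod.fst) (v := fun p => p.2.foldl (· + ·) 0) (d := PySem.Dict.empty)
      (by intro a _; simp [PySem.Dict.contains_empty]) hk1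
    simpa [List.map_map, Function.comp, sumSlice] using this
  have hval : d2.values = (gastos.map sumSlice).map Prod.snd := by
    simp only [PySem.Dict.values, h2]
  rw [h2]
  cases gastos with
  | nil => rfl
  | cons g0 gs =>
      -- B's side: the first step loads (g0.1, s0), then foldB applies
      have hB : ((g0 :: gs).foldl (fun acc p =>
          let s := (PySem.List.slice p.2 (some 6) (some 12)).foldl (· + ·) 0
          match acc.1 with
          | none => (some p.1, s)
          | some _ => if s > acc.2 then (some p.1, s) else acc)
        ((none : Option String), (0 : Int))).1
          = some (bestP (sumSlice g0) (gs.map sumSlice)).1 := by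
        simp only [List.foldl_cons]
        show (gs.foldl _ (some g0.1, (sumSlice g0).2)).1 = _
        rw [foldB]
        rfl
      -- A's side: the recomputed max is the bestP value, then fmScan finds its first key
      have hmax : PySem.List.max? d2.values (fun x => x)
          = some ((bestP (sumSlice g0) (gs.map sumSlice)).2) := by
        rw [hval]
        simp only [List.map_cons]
        rw [PySem.List.max?_id_cons]
        rw [foldl_max_eq_bestP_snd (gs.map sumSlice) (sumSlice g0)]
      rw [loopA_eq_fmScan d2 _ hmax, hB, List.map_cons]
      exact fm_bestP (gs.map sumSlice) (sumSlice g0)
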